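-- pv_equiv track=rewrite | github.com/GrulsuitG/algorithm | algorithm-python/programmers/n진수 게임.py | solution
-- ===== SOURCE A (Python) =====
-- digit = list("0123456789ABCDEF")
--
-- def solution(n, t, m, p):
--     answer = ''
--     turn = 0
--     cur = 0
--     while len(answer) < t:
--         i = convert(cur, n)
--         for j in i:
--             if turn == p - 1:
--                 answer += j
--                 if len(answer) == t:
--                     break
--             turn = (turn + 1) % m
--         cur += 1
--     return answer
--
-- def convert(i, n):
--     if i == 0:
--         return "0"
--     result = ""
--     while i > 0:
--         result += digit[i % n]
--         i //= n
--
--     return result[::-1]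
-- ===== SOURCE B (Python) =====
-- # Two-phase rewrite: build the digit stream to a precomputed length, then pick
-- # player p's t digits directly at positions p-1, p-1+m, ... (no turn counter).
-- digit = list("0123456789ABCDEF")
--
-- def convert(i, n):
--     if i < n:
--         return digit[i]
--     return convert(i // n, n) + digit[i % n]
--
-- def solution(n, t, m, p):
--     if t <= 0:
--         return ''
--     need = p + m * (t - 1)
--     stream = ''
--     cur = 0
--     while len(stream) < need:
--         stream += convert(cur, n)
--         cur += 1
--     return ''.join(stream[p - 1 + m * k] for k in range(t))
-- ===== Notes on version B (the rewrite author's own statement) =====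
-- stated objective: simpler
-- what changed: A interleaves generation with a modular turn counter, an inner per-character selection loop and a break; B first builds the digit stream to the closed-form length p + m*(t-1) and then reads the t answer characters directly at positions p-1 + m*k.
-- outside the precondition, e.g. on solution(5, 2, -6, -1): A returns '42', B raises IndexError; on solution(-5, 3, 6, 2): A returns 'CDE', B raises RecursionError; on solution(20, 1, 1, 1): A returns '0', B returns '0'
import Mathlib
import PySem

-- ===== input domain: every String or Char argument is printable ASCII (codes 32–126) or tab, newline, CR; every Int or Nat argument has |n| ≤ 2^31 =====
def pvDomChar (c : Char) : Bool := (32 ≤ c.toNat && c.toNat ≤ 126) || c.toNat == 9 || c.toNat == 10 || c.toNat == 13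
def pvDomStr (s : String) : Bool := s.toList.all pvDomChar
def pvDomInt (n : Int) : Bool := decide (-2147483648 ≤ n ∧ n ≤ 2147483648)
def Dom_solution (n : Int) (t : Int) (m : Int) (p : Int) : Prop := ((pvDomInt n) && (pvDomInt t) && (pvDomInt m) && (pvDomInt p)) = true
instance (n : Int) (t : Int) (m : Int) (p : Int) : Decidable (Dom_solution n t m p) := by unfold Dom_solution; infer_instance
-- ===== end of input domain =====

-- B rebuilds A's answer in two phases (build the whole digit stream, then read the
-- t characters at positions p-1 + m*k) instead of A's inline turn-counter selection.

-- ===== PORT A =====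

def pvDigit : List Char := ['0','1','2','3','4','5','6','7','8','9','A','B','C','D','E','F']

-- while i > 0: result += digit[i % n]; i //= n   (fuel i.toNat suffices for n ≥ 2;
-- digit[i % n] out of range raises in Python — excluded by Pre_)
def pvConvA (n : Int) : Nat → Int → List Char → List Char
  | 0, _, acc => acc
  | f + 1, i, acc =>
    if 0 < i then
      pvConvA n f (PySem.Int.floordiv i n) (acc ++ [PySem.List.pyGetD pvDigit (PySem.Int.mod i n) ' '])
    else acc

def pvConvertA (i : Int) (n : Int) : List Char :=
  if i = 0 then ['0'] else (pvConvA n (i.toNat + 1) i []).reverse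

-- the inner 'for j in i' loop: state (answer, turn); break leaves turn untouched
def pvInner (t m p : Int) : List Char → List Char → Int → List Char × Int
  | [], a, tr => (a, tr)
  | c :: L, a, tr =>
    if tr = p - 1 then
      if ((a ++ [c]).length : Int) = t then (a ++ [c], tr)
      else pvInner t m p L (a ++ [c]) (PySem.Int.mod (tr + 1) m)
    else pvInner t m p L a (PySem.Int.mod (tr + 1) m)

-- the outer 'while len(answer) < t' loop; (m*t).toNat chunks always suffice inside Pre_
def pvLoopA (n t m p : Int) : Nat → List Char → Int → Int → List Char
  | 0, a, _, _ => a
  | f + 1, a, tr, cur =>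
    if (a.length : Int) < t then
      pvLoopA n t m p f (pvInner t m p (pvConvertA cur n) a tr).1
        (pvInner t m p (pvConvertA cur n) a tr).2 (cur + 1)
    else a

def solution (n : Int) (t : Int) (m : Int) (p : Int) : String :=
  String.mk (pvLoopA n t m p (m * t).toNat [] 0 0)

-- ===== PORT B =====

-- convert(i, n) = convert(i // n, n) + digit[i % n] for i ≥ n, else digit[i]
def pvConvB (n : Int) : Nat → Int → List Char
  | 0, _ => []
  | f + 1, i =>
    if i < n then [PySem.List.pyGetD pvDigit i ' ']
    else pvConvB n f (PySem.Int.floordiv i n) ++ [PySem.List.pyGetD pvDigit (PySem.Int.mod i n) ' ']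

def pvConvertB (i : Int) (n : Int) : List Char := pvConvB n (i.toNat + 1) i

-- while len(stream) < need: stream += convert(cur, n)  (each chunk is nonempty, so
-- need.toNat iterations always suffice)
def pvBuild (n need : Int) : Nat → List Char → Int → List Char
  | 0, s, _ => s
  | f + 1, s, cur =>
    if (s.length : Int) < need then pvBuild n need f (s ++ pvConvertB cur n) (cur + 1)
    else s

-- ''.join(stream[p-1+m*k] for k in range(t)); inside Pre_ every index is in range
def solution_alt (n : Int) (t : Int) (m : Int) (p : Int) : String :=
  if t ≤ 0 then "" else
    String.mk
      ((PySem.List.pyRange 0 t 1).foldl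
        (fun acc k =>
          acc ++ [PySem.List.pyGetD (pvBuild n (p + m * (t - 1)) (p + m * (t - 1)).toNat [] 0)
                    (p - 1 + m * k) ' ']) [])

-- ===== PRECONDITION & SPEC =====

-- Pre_ excludes inputs with t > 0 that leave the puzzle's stated domain (n outside 2..16
-- or not 1 ≤ p ≤ m): there A diverges (n = 1, or p-1 never hit), raises (n = 0 or digit
-- lookups past 'F'), or returns accidental values from negative-modulus turn wraparound /
-- lucky termination before an out-of-range digit, on which B raises.
def Pre_solution (n : Int) (t : Int) (m : Int) (p : Int) : Prop :=
  t ≤ 0 ∨ (2 ≤ n ∧ n ≤ 16 ∧ 1 ≤ p ∧ p ≤ m)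
instance (n : Int) (t : Int) (m : Int) (p : Int) : Decidable (Pre_solution n t m p) := by
  unfold Pre_solution; infer_instance

def pvWitness_solution : Int × Int × Int × Int := (2, 4, 2, 1)

def Spec_solution (n : Int) (t : Int) (m : Int) (p : Int) (out : String) : Prop := out = solution_alt n t m p
instance (n : Int) (t : Int) (m : Int) (p : Int) (out : String) : Decidable (Spec_solution n t m p out) := by unfold Spec_solution; infer_instance

-- ===== CLAIM (what is proved, stated in full; the proofs are below) =====
def Claim_equal_solution : Prop := ∀ (n : Int) (t : Int) (m : Int) (p : Int), Dom_solution n t m p → Pre_solution n t m p → Spec_solution n t m p (solution n t m p)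

-- ===== LEMMAS AND PROOFS =====

-- strided selection: pvSel M L d picks L[d], L[d+M], …, returning the leftover skip
def pvSel (M : Nat) : List Char → Nat → List Char × Nat
  | [], d => ([], d)
  | c :: L, 0 => ((c :: (pvSel M L (M - 1)).1), (pvSel M L (M - 1)).2)
  | _ :: L, d + 1 => pvSel M L d


def pvCat (n : Int) : Nat → Int → List Char
  | 0, _ => []
  | f + 1, cur => pvConvertB cur n ++ pvCat n f (cur + 1)

theorem pvSel_append (M : Nat) (L1 L2 : List Char) (d : Nat) :
    pvSel M (L1 ++ L2) d =
      ((pvSel M L1 d).1 ++ (pvSel M L2 (pvSel M L1 d).2).1, (pvSel M L2 (pvSel M L1 d).2).2) := by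
  induction L1 generalizing d with
  | nil => simp [pvSel]
  | cons c L ih =>
    cases d with
    | zero => simp [pvSel, ih]
    | succ e => simp [pvSel, ih]

theorem pvSel_length (M : Nat) (hM : 0 < M) (L : List Char) (d : Nat) :
    ((pvSel M L d).1).length = (L.length - d + M - 1) / M := by
  induction L generalizing d with
  | nil => simp only [pvSel, List.length_nil]; rw [Nat.div_eq_of_lt (by omega)]
  | cons c L ih =>
    cases d with
    | zero =>
      simp only [pvSel, List.length_cons, ih (M - 1)]
      rcases Nat.lt_or_ge L.length (M - 1) with h | h
      · have h1 : L.length - (M - 1) + M - 1 = M - 1 := by omega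
        rw [h1, Nat.div_eq_of_lt (by omega),
          Nat.div_eq_of_lt_le (by omega) (show L.length + 1 - 0 + M - 1 < 2 * M by omega)]
      · have h1 : L.length - (M - 1) + M - 1 = L.length := by omega
        have h2 : L.length + 1 - 0 + M - 1 = L.length + M := by omega
        rw [h1, h2, Nat.add_div_right _ hM]
    | succ e =>
      simp only [pvSel, List.length_cons, ih e]
      congr 1
      omega

theorem pvSel_get (M : Nat) (hM : 0 < M) (L : List Char) (d j : Nat) (h : d + M * j < L.length) :
    ((pvSel M L d).1)[j]? = L[d + M * j]? := by
  induction L generalizing d j with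
  | nil => simp at h
  | cons c L ih =>
    cases d with
    | zero =>
      cases j with
      | zero => simp [pvSel]
      | succ j' =>
        simp only [pvSel]
        rw [Nat.mul_succ] at h
        have h' : (M - 1) + M * j' < L.length := by
          simp at h; omega
        have hidx : 0 + M * (j' + 1) = (M - 1 + M * j') + 1 := by
          rw [Nat.mul_succ]; omega
        rw [hidx]
        simp only [List.getElem?_cons_succ]
        exact ih (M - 1) j' h'
    | succ e =>
      simp only [pvSel]
      have h' : e + M * j < L.length := by simp at h; omega
      have hidx : e + 1 + M * j = (e + M * j) + 1 := by omega
      rw [ih e j h', hidx]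
      simp

theorem pvConvB_ne_nil (n i : Int) (f : Nat) : pvConvB n (f + 1) i ≠ [] := by
  simp only [pvConvB]
  split <;> simp

theorem pvConvertB_ne_nil (n i : Int) : pvConvertB i n ≠ [] := pvConvB_ne_nil n i _

theorem pv_ediv_lt (i n : Int) (hi : 0 < i) (hn : 2 ≤ n) : PySem.Int.floordiv i n < i := by
  rw [PySem.Int.floordiv_eq_ediv_of_pos (by omega), Int.ediv_lt_iff_lt_mul (by omega)]
  nlinarith

theorem pv_ediv_nonneg (i n : Int) (hi : 0 ≤ i) (hn : 2 ≤ n) : 0 ≤ PySem.Int.floordiv i n := by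
  rw [PySem.Int.floordiv_eq_ediv_of_pos (by omega)]
  exact Int.ediv_nonneg hi (by omega)

theorem pvConvA_acc (n : Int) (f : Nat) : ∀ (i : Int) (acc : List Char),
    pvConvA n f i acc = acc ++ pvConvA n f i [] := by
  induction f with
  | zero => intro i acc; simp [pvConvA]
  | succ f ih =>
    intro i acc
    simp only [pvConvA]
    split
    · rw [ih _ (acc ++ _), ih _ ([] ++ _)]
      simp
    · simp

theorem pvConvA_nil (n : Int) (f : Nat) (i : Int) (hi : ¬ 0 < i) : pvConvA n f i [] = [] := by
  cases f <;> simp [pvConvA, hi]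

theorem pvConvA_step (n i : Int) (f : Nat) (hi : 0 < i) :
    pvConvA n (f + 1) i [] =
      PySem.List.pyGetD pvDigit (PySem.Int.mod i n) ' ' :: pvConvA n f (PySem.Int.floordiv i n) [] := by
  simp only [pvConvA, if_pos hi]
  rw [pvConvA_acc n f]
  simp

theorem pvConvB_step (n i : Int) (f : Nat) (hge : ¬ i < n) :
    pvConvB n (f + 1) i =
      pvConvB n f (PySem.Int.floordiv i n) ++ [PySem.List.pyGetD pvDigit (PySem.Int.mod i n) ' '] := by
  simp only [pvConvB, if_neg hge]

theorem pvConvA_fuel (n : Int) (hn : 2 ≤ n) :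
    ∀ (f g : Nat) (i : Int), 0 < i → i.toNat ≤ f → i.toNat ≤ g →
      pvConvA n f i [] = pvConvA n g i [] := by
  intro f
  induction f using Nat.strong_induction_on with
  | _ f ih =>
    intro g i hi hf hg
    obtain ⟨f', rfl⟩ : ∃ f', f = f' + 1 := ⟨f - 1, by omega⟩
    obtain ⟨g', rfl⟩ : ∃ g', g = g' + 1 := ⟨g - 1, by omega⟩
    rw [pvConvA_step n i f' hi, pvConvA_step n i g' hi]
    have hlt := pv_ediv_lt i n hi hn
    have hnn := pv_ediv_nonneg i n (le_of_lt hi) hn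
    by_cases h0 : 0 < PySem.Int.floordiv i n
    · rw [ih f' (by omega) g' _ h0 (by omega) (by omega)]
    · rw [pvConvA_nil n f' _ h0, pvConvA_nil n g' _ h0]

theorem pvConvB_fuel (n : Int) (hn : 2 ≤ n) :
    ∀ (f g : Nat) (i : Int), 0 ≤ i → i.toNat < f → i.toNat < g →
      pvConvB n f i = pvConvB n g i := by
  intro f
  induction f using Nat.strong_induction_on with
  | _ f ih =>
    intro g i hi hf hg
    obtain ⟨f', rfl⟩ : ∃ f', f = f' + 1 := ⟨f - 1, by omega⟩
    obtain ⟨g', rfl⟩ : ∃ g', g = g' + 1 := ⟨g - 1, by omega⟩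
    by_cases hlt : i < n
    · simp only [pvConvB, if_pos hlt]
    · rw [pvConvB_step n i f' hlt, pvConvB_step n i g' hlt]
      have hl := pv_ediv_lt i n (by omega) hn
      have hnn := pv_ediv_nonneg i n hi hn
      rw [ih f' (by omega) g' _ hnn (by omega) (by omega)]

theorem pvConvert_eq (n : Int) (hn : 2 ≤ n) :
    ∀ (k : Nat) (i : Int), 0 ≤ i → i.toNat ≤ k → pvConvertA i n = pvConvertB i n := by
  intro k
  induction k using Nat.strong_induction_on with
  | _ k ih =>
    intro i hi hk
    by_cases h0 : i = 0
    · subst h0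
      have hA : pvConvertA 0 n = ['0'] := by simp [pvConvertA]
      have hB : pvConvertB 0 n = ['0'] := by
        simp only [pvConvertB, Int.toNat_zero, pvConvB]
        rw [if_pos (show (0 : Int) < n by omega)]
        decide
      rw [hA, hB]
    · have hipos : 0 < i := by omega
      simp only [pvConvertA, pvConvertB, if_neg h0]
      obtain ⟨f', hf'⟩ : ∃ f', i.toNat = f' + 1 := ⟨i.toNat - 1, by omega⟩
      rw [hf', pvConvA_step n i (f' + 1) hipos]
      by_cases hlt : i < n
      · have hq : PySem.Int.floordiv i n = 0 := by
          rw [PySem.Int.floordiv_eq_ediv_of_pos (by omega)]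
          exact Int.ediv_eq_zero_of_lt hi hlt
        have hmod : PySem.Int.mod i n = i := by
          rw [PySem.Int.mod_eq_emod_of_pos (by omega)]
          exact Int.emod_eq_of_lt hi hlt
        rw [hq, pvConvA_nil n (f' + 1) 0 (by omega), hmod]
        simp only [pvConvB, if_pos hlt]
        rfl
      · rw [pvConvB_step n i (f' + 1) hlt]
        have hq1 : 1 ≤ PySem.Int.floordiv i n := by
          rw [PySem.Int.floordiv_eq_ediv_of_pos (by omega), Int.le_ediv_iff_mul_le (by omega)]
          omega
        have hqlt := pv_ediv_lt i n hipos hn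
        set q := PySem.Int.floordiv i n with hqdef
        have hA : pvConvA n (f' + 1) q [] = pvConvA n (q.toNat + 1) q [] :=
          pvConvA_fuel n hn (f' + 1) (q.toNat + 1) q (by omega) (by omega) (by omega)
        have hB : pvConvB n (f' + 1) q = pvConvB n (q.toNat + 1) q :=
          pvConvB_fuel n hn (f' + 1) (q.toNat + 1) q (by omega) (by omega) (by omega)
        have hIH : pvConvertA q n = pvConvertB q n :=
          ih (k - 1) (by omega) q (by omega) (by omega)
        simp only [pvConvertA, pvConvertB, if_neg (show ¬ q = 0 by omega)] at hIH
        rw [hA, hB, ← hIH]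
        simp

theorem pvCat_add (n : Int) (g : Nat) : ∀ (f : Nat) (cur : Int),
    pvCat n (f + g) cur = pvCat n f cur ++ pvCat n g (cur + f) := by
  intro f
  induction f generalizing g with
  | zero => intro cur; simp [pvCat]
  | succ f ih =>
    intro cur
    have h1 : f + 1 + g = (f + g) + 1 := by omega
    rw [h1]
    simp only [pvCat]
    rw [ih g (cur + 1), List.append_assoc]
    congr 3
    push_cast
    ring

theorem pvCat_length (n : Int) : ∀ (f : Nat) (cur : Int), f ≤ (pvCat n f cur).length := by
  intro f
  induction f with
  | zero => intro cur; simp [pvCat]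
  | succ f ih =>
    intro cur
    simp only [pvCat, List.length_append]
    have h2 : 0 < (pvConvertB cur n).length := List.length_pos_of_ne_nil (pvConvertB_ne_nil n cur)
    have := ih (cur + 1)
    omega

theorem pv_sub_emod_emod (x y m : Int) : (x - y% m)% m = (x - y)% m := by
  rw [Int.sub_emod x (y% m), Int.emod_emod_of_dvd _ dvd_rfl, ← Int.sub_emod]

theorem pv_neg_one_emod (m : Int) (hm : 0 < m) : (-1 : Int)% m = m - 1 := by
  rw [show (-1 : Int) = (m - 1) + m * (-1) by ring, Int.add_mul_emod_self_left,
    Int.emod_eq_of_lt (by omega) (by omega)]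

theorem pv_emod_sub_one (x m : Int) (hm : 0 < m) (hne : x% m ≠ 0) :
    (x - 1)% m = x% m - 1 := by
  have hb1 : 0 ≤ x% m := Int.emod_nonneg x (by omega)
  have hb2 : x% m < m := Int.emod_lt_of_pos x hm
  have hm2 : 2 ≤ m := by
    rcases Int.lt_or_le 1 m with h | h
    · omega
    · have : m = 1 := by omega
      subst this
      simp at hne
  rw [Int.sub_emod x 1, Int.emod_eq_of_lt (show (0:Int) ≤ 1 by omega) (by omega),
    Int.emod_eq_of_lt (by omega) (by omega)]

theorem pv_emod_ne_zero (x m : Int) (hm : 0 < m) (hlo : -m < x) (hhi : x < m) (hx : x ≠ 0) :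
    x% m ≠ 0 := by
  by_cases h : 0 ≤ x
  · rw [Int.emod_eq_of_lt h hhi]; exact hx
  · rw [show x = (x + m) + m * (-1) by ring, Int.add_mul_emod_self_left,
      Int.emod_eq_of_lt (by omega) (by omega)]
    omega

theorem pvInner_spec (t m p : Int) (hm : 0 < m) (hp1 : 1 ≤ p) (hpm : p ≤ m)
    (L : List Char) : ∀ (a : List Char) (tr : Int), 0 ≤ tr → tr < m → (a.length : Int) < t →
    (pvInner t m p L a tr).1 =
      a ++ ((pvSel m.toNat L ((PySem.Int.mod (p - 1 - tr) m).toNat)).1).take (t.toNat - a.length)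
    ∧ (((pvSel m.toNat L ((PySem.Int.mod (p - 1 - tr) m).toNat)).1).length < t.toNat - a.length →
        0 ≤ (pvInner t m p L a tr).2 ∧ (pvInner t m p L a tr).2 < m ∧
        (PySem.Int.mod (p - 1 - (pvInner t m p L a tr).2) m).toNat =
          (pvSel m.toNat L ((PySem.Int.mod (p - 1 - tr) m).toNat)).2) := by
  induction L with
  | nil =>
    intro a tr h1 h2 h3
    exact ⟨by simp [pvInner, pvSel], fun _ => ⟨h1, h2, by simp [pvInner, pvSel]⟩⟩
  | cons c L ih =>
    intro a tr h1 h2 h3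
    simp only [PySem.Int.mod_eq_emod_of_pos hm] at ih ⊢
    have hrem : 1 ≤ t.toNat - a.length := by omega
    by_cases htr : tr = p - 1
    · have htN : ((p - 1 - tr)% m).toNat = 0 := by
        rw [show p - 1 - tr = 0 by omega]
        simp
      rw [htN]
      simp only [pvInner, if_pos htr, PySem.Int.mod_eq_emod_of_pos hm]
      by_cases hbrk : ((a ++ [c]).length : Int) = t
      · rw [if_pos hbrk]
        simp only [List.length_append, List.length_cons, List.length_nil] at hbrk
        constructor
        · have h4 : t.toNat - a.length = 1 := by omega
          rw [h4]
          simp [pvSel]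
        · intro hlen
          simp only [pvSel, List.length_cons] at hlen
          omega
      · rw [if_neg hbrk]
        have hlen' : ((a ++ [c]).length : Int) < t := by
          simp only [List.length_append, List.length_cons, List.length_nil] at hbrk ⊢
          push_cast
          omega
        have htr1 : 0 ≤ (tr + 1)% m := Int.emod_nonneg _ (by omega)
        have htr2 : (tr + 1)% m < m := Int.emod_lt_of_pos _ hm
        have hD' : ((p - 1 - (tr + 1)% m)% m).toNat = m.toNat - 1 := by
          rw [pv_sub_emod_emod, show p - 1 - (tr + 1) = -1 by omega, pv_neg_one_emod m hm]
          omega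
        obtain ⟨IH1, IH2⟩ := ih (a ++ [c]) ((tr + 1)% m) htr1 htr2 hlen'
        rw [hD'] at IH1 IH2
        constructor
        · rw [IH1]
          simp only [pvSel, List.length_append, List.length_cons, List.length_nil]
          rw [show t.toNat - a.length = (t.toNat - (a.length + 1)) + 1 by omega,
            List.take_succ_cons]
          simp
        · intro hlen
          simp only [pvSel, List.length_cons] at hlen
          refine (IH2 ?_).imp id (fun h => h.imp id ?_)
          · simp only [List.length_append, List.length_cons, List.length_nil]
            omega
          · intro h
            rw [h]
            simp only [pvSel]
    · have hDne : (p - 1 - tr)% m ≠ 0 :=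
        pv_emod_ne_zero _ m hm (by omega) (by omega) (by omega)
      have hDlo : 0 ≤ (p - 1 - tr)% m := Int.emod_nonneg _ (by omega)
      obtain ⟨e, he⟩ : ∃ e, ((p - 1 - tr)% m).toNat = e + 1 :=
        ⟨((p - 1 - tr)% m).toNat - 1, by omega⟩
      rw [he]
      simp only [pvInner, if_neg htr, PySem.Int.mod_eq_emod_of_pos hm]
      have htr1 : 0 ≤ (tr + 1)% m := Int.emod_nonneg _ (by omega)
      have htr2 : (tr + 1)% m < m := Int.emod_lt_of_pos _ hm
      have hD' : ((p - 1 - (tr + 1)% m)% m).toNat = e := by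
        rw [pv_sub_emod_emod, show p - 1 - (tr + 1) = (p - 1 - tr) - 1 by ring,
          pv_emod_sub_one _ m hm hDne]
        omega
      obtain ⟨IH1, IH2⟩ := ih a ((tr + 1)% m) htr1 htr2 h3
      rw [hD'] at IH1 IH2
      exact ⟨by rw [IH1]; simp only [pvSel], fun hlen => by
        refine (IH2 ?_).imp id (fun h => h.imp id ?_)
        · simpa only [pvSel] using hlen
        · intro h
          rw [h]
          simp only [pvSel]⟩

theorem pvLoopA_stop (n t m p : Int) (f : Nat) (a : List Char) (tr cur : Int)
    (h : ¬ (a.length : Int) < t) : pvLoopA n t m p f a tr cur = a := by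
  cases f <;> simp [pvLoopA, h]

theorem pvLoopA_spec (n t m p : Int) (hn : 2 ≤ n) (hm : 0 < m) (hp1 : 1 ≤ p) (hpm : p ≤ m) :
    ∀ (fuel : Nat) (a : List Char) (tr cur : Int), 0 ≤ tr → tr < m → 0 ≤ cur →
    (a.length : Int) < t →
    t.toNat - a.length ≤ ((pvSel m.toNat (pvCat n fuel cur) ((PySem.Int.mod (p - 1 - tr) m).toNat)).1).length →
    pvLoopA n t m p fuel a tr cur =
      a ++ ((pvSel m.toNat (pvCat n fuel cur) ((PySem.Int.mod (p - 1 - tr) m).toNat)).1).take (t.toNat - a.length) := by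
  intro fuel
  induction fuel with
  | zero =>
    intro a tr cur h1 h2 hcur h3 hcov
    simp only [pvCat, pvSel, List.length_nil] at hcov
    omega
  | succ f ihf =>
    intro a tr cur h1 h2 hcur h3 hcov
    simp only [PySem.Int.mod_eq_emod_of_pos hm] at hcov ⊢
    have hchunk : pvConvertA cur n = pvConvertB cur n :=
      pvConvert_eq n hn cur.toNat cur hcur le_rfl
    simp only [pvLoopA, if_pos h3, hchunk]
    simp only [pvCat, pvSel_append] at hcov ⊢
    obtain ⟨IH1, IH2⟩ := pvInner_spec t m p hm hp1 hpm (pvConvertB cur n) a tr h1 h2 h3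
    rw [PySem.Int.mod_eq_emod_of_pos hm] at IH1 IH2
    simp only [List.length_append] at hcov
    by_cases hc : ((pvSel m.toNat (pvConvertB cur n) ((p - 1 - tr) % m).toNat).1).length
        < t.toNat - a.length
    · obtain ⟨hb1, hb2, hb3⟩ := IH2 hc
      rw [PySem.Int.mod_eq_emod_of_pos hm] at hb3
      have hr1 : (pvInner t m p (pvConvertB cur n) a tr).1 =
          a ++ (pvSel m.toNat (pvConvertB cur n) ((p - 1 - tr) % m).toNat).1 := by
        rw [IH1, List.take_of_length_le (le_of_lt hc)]
      have hlen2 : ((pvInner t m p (pvConvertB cur n) a tr).1.length : Int) < t := by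
        rw [hr1]
        simp only [List.length_append]
        push_cast
        omega
      have hcov2 : t.toNat - (pvInner t m p (pvConvertB cur n) a tr).1.length ≤
          ((pvSel m.toNat (pvCat n f (cur + 1))
            ((p - 1 - (pvInner t m p (pvConvertB cur n) a tr).2) % m).toNat).1).length := by
        rw [hb3, hr1]
        simp only [List.length_append]
        omega
      have := ihf (pvInner t m p (pvConvertB cur n) a tr).1
        (pvInner t m p (pvConvertB cur n) a tr).2 (cur + 1) hb1 hb2 (by omega) hlen2
        (by rw [PySem.Int.mod_eq_emod_of_pos hm]; exact hcov2)
      rw [PySem.Int.mod_eq_emod_of_pos hm] at this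
      rw [this, hb3, hr1]
      rw [List.take_append, List.take_of_length_le (le_of_lt hc), List.append_assoc]
      congr 2
      simp only [List.length_append]
      congr 1
      omega
    · replace hc := Nat.le_of_not_lt hc
      have hr1 : (pvInner t m p (pvConvertB cur n) a tr).1.length = t.toNat := by
        rw [IH1]
        simp only [List.length_append, List.length_take]
        omega
      have hstop : ¬ ((pvInner t m p (pvConvertB cur n) a tr).1.length : Int) < t := by
        rw [hr1]
        omega
      rw [pvLoopA_stop n t m p f _ _ _ hstop, IH1,
        List.take_append_of_le_length hc]

theorem pvSel_take_stable (M : Nat) (L1 L2 : List Char) (d T : Nat)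
    (h : T ≤ ((pvSel M L1 d).1).length) :
    ((pvSel M (L1 ++ L2) d).1).take T = ((pvSel M L1 d).1).take T := by
  rw [pvSel_append]
  exact List.take_append_of_le_length h

theorem pvBuild_spec (n need : Int) : ∀ (f : Nat) (s : List Char) (cur : Int),
    ∃ j : Nat, j ≤ f ∧ pvBuild n need f s cur = s ++ pvCat n j cur ∧
      (need ≤ ((s ++ pvCat n j cur).length : Int) ∨ j = f) := by
  intro f
  induction f with
  | zero =>
    intro s cur
    exact ⟨0, le_rfl, by simp [pvBuild, pvCat], Or.inr rfl⟩
  | succ f ih =>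
    intro s cur
    by_cases h : (s.length : Int) < need
    · obtain ⟨j, hj, heq, hor⟩ := ih (s ++ pvConvertB cur n) (cur + 1)
      refine ⟨j + 1, by omega, ?_, ?_⟩
      · simp only [pvBuild, if_pos h]
        rw [heq]
        simp [pvCat, List.append_assoc]
      · rcases hor with h' | h'
        · left
          simpa [pvCat, List.append_assoc] using h'
        · right
          omega
    · refine ⟨0, by omega, ?_, Or.inl ?_⟩
      · simp only [pvBuild, if_neg h]
        simp [pvCat]
      · simp only [pvCat, List.append_nil]
        omega

-- ===== VERDICT (by name: the statement is the Claim_ definition above) =====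
theorem solution_spec : Claim_equal_solution := by
  unfold Claim_equal_solution
  intro n t m p _ hpre
  unfold Spec_solution
  by_cases ht : t ≤ 0
  · unfold solution solution_alt
    rw [if_pos ht, pvLoopA_stop n t m p _ _ _ _ (by simp; omega)]
    rfl
  · obtain ⟨hn, hn16, hp1, hpm⟩ := hpre.resolve_left ht
    have hm : 0 < m := by omega
    have ht0 : 0 < t := by omega
    have hM : 0 < m.toNat := by omega
    set M := m.toNat with hMdef
    set T := t.toNat with hTdef
    set d := (p - 1).toNat with hddef
    have hmM : m = (M : Int) := by omega
    have htT : t = (T : Int) := by omega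
    have hpd : p - 1 = (d : Int) := by omega
    have hdM : d < M := by omega
    have hT1 : 1 ≤ T := by omega
    -- A side
    have hfuelA : (m * t).toNat = M * T := by
      rw [hmM, htT, ← Nat.cast_mul, Int.toNat_natCast]
    have hd0 : ((PySem.Int.mod (p - 1 - 0) m).toNat) = d := by
      rw [PySem.Int.mod_eq_emod_of_pos hm, sub_zero, Int.emod_eq_of_lt (by omega) (by omega)]
    have hcovA : T ≤ ((pvSel M (pvCat n (M * T) 0) d).1).length := by
      rw [pvSel_length M hM]
      have hlen := pvCat_length n (M * T) 0
      rw [Nat.le_div_iff_mul_le hM]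
      have hc : T * M = M * T := Nat.mul_comm T M
      omega
    have hA : solution n t m p =
        String.mk (((pvSel M (pvCat n (M * T) 0) d).1).take T) := by
      unfold solution
      rw [hfuelA,
        pvLoopA_spec n t m p hn hm hp1 hpm (M * T) [] 0 0 le_rfl hm (le_refl 0)
          (by simp; omega)
          (by rw [hd0]; simp only [List.length_nil, Nat.sub_zero]; exact hcovA)]
      rw [hd0]
      simp only [List.nil_append, List.length_nil, Nat.sub_zero]
      rfl
    -- B side
    set need := p + m * (t - 1) with hneeddef
    have ht1c : (t - 1) = ((T - 1 : Nat) : Int) := by omega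
    have hprod : m * (t - 1) = ((M * (T - 1) : Nat) : Int) := by
      rw [hmM, ht1c, ← Nat.cast_mul]
    have hneedeq : need = ((d + M * (T - 1) + 1 : Nat) : Int) := by
      rw [hneeddef, hprod]
      push_cast
      omega
    have hneedN : need.toNat = d + M * (T - 1) + 1 := by
      rw [hneedeq, Int.toNat_natCast]
    obtain ⟨j, hj, hstream, hor⟩ := pvBuild_spec n need need.toNat [] 0
    simp only [List.nil_append] at hstream hor
    have hlenB : need.toNat ≤ (pvCat n j 0).length := by
      rcases hor with h | h
      · omega
      · have := pvCat_length n j 0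
        omega
    have e1 : M * (T - 1) + M = M * T := by
      have : T - 1 + 1 = T := by omega
      rw [← Nat.mul_succ, Nat.succ_eq_add_one, this]
    have hcovB : T ≤ ((pvSel M (pvCat n j 0) d).1).length := by
      rw [pvSel_length M hM, Nat.le_div_iff_mul_le hM]
      have hc : T * M = M * T := Nat.mul_comm T M
      rw [hneedN] at hlenB
      omega
    have hB : solution_alt n t m p = String.mk (((pvSel M (pvCat n j 0) d).1).take T) := by
      unfold solution_alt
      rw [if_neg ht, ← hneeddef, hstream, PySem.List.foldl_append_singleton_eq_map, htT,
        PySem.List.pyRange_zero_natCast, List.nil_append, List.map_map]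
      congr 1
      refine List.ext_getElem ?_ ?_
      · simp only [List.length_map, List.length_range, List.length_take]
        omega
      · intro k hk1 hk2
        simp only [List.length_map, List.length_range] at hk1
        have hbk : d + M * k < (pvCat n j 0).length := by
          have : M * k ≤ M * (T - 1) := Nat.mul_le_mul_left M (by omega)
          omega
        have hidx : p - 1 + m * ((k : Nat) : Int) = ((d + M * k : Nat) : Int) := by
          rw [hpd, hmM]
          push_cast
          ring
        rw [List.getElem_map, List.getElem_range, Function.comp, hidx,
          PySem.List.pyGetD_natCast, List.getD_eq_getElem _ _ hbk, List.getElem_take]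
        have hsel := pvSel_get M hM (pvCat n j 0) d k hbk
        have hk3 : k < ((pvSel M (pvCat n j 0) d).1).length := by omega
        rw [List.getElem?_eq_getElem hk3, List.getElem?_eq_getElem hbk] at hsel
        exact (Option.some_injective _ hsel).symm
    rw [hA, hB]
    rcases Nat.le_total (M * T) j with hle | hle
    · obtain ⟨r, hr⟩ : ∃ r, j = M * T + r := ⟨j - M * T, by omega⟩
      rw [hr, pvCat_add n r (M * T) 0, pvSel_take_stable M _ _ d T hcovA]
    · obtain ⟨r, hr⟩ : ∃ r, M * T = j + r := ⟨M * T - j, by omega⟩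
      rw [hr, pvCat_add n r j 0, pvSel_take_stable M _ _ d T hcovB]
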